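-- pv_equiv track=rewrite | github.com/HRItdy/Symbolic_VLA | libero_vla_labeler/src/gripper_segmenter.py | _find_transitions
-- ===== SOURCE A (Python) =====
-- from typing import Literal
--
-- GripperState = Literal["open", "close"]
--
-- def _find_transitions(states: list[GripperState], min_len: int) -> list[int]:
--     """
--     Return frame indices where the gripper state changes.
--     Transitions belonging to runs shorter than `min_len` are discarded.
--     """
--     n = len(states)
--     # Build runs: (state, start, end_inclusive)
--     runs: list[tuple[GripperState, int, int]] = []
--     i = 0
--     while i < n:
--         j = i
--         while j < n and states[j] == states[i]:
--             j += 1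
--         runs.append((states[i], i, j - 1))
--         i = j
--
--     # Filter short runs (merge into previous)
--     filtered: list[tuple[GripperState, int, int]] = []
--     for run in runs:
--         if len(filtered) > 0 and (run[2] - run[1] + 1) < min_len:
--             # extend previous run to absorb this short one
--             prev = filtered[-1]
--             filtered[-1] = (prev[0], prev[1], run[2])
--         else:
--             filtered.append(run)
--
--     # Transition indices = start of each run except the first
--     transitions = [r[1] for r in filtered[1:]]
--     return transitions
-- ===== SOURCE B (Python) =====
-- def _find_transitions(states, min_len):
--     # Single streaming pass: close each run when the state changes (or at the
--     # end), emit its start index unless it is the first run or shorter than min_len.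
--     n = len(states)
--     transitions = []
--     run_start = 0
--     first = True
--     for i in range(1, n + 1):
--         if i == n or states[i] != states[run_start]:
--             if not first and i - run_start >= min_len:
--                 transitions.append(run_start)
--             first = False
--             run_start = i
--     return transitions
-- ===== Notes on version B (the rewrite author's own statement) =====
-- stated objective: simpler
-- what changed: Replaces the three phases (build an explicit runs list, mutate-merge short runs into their predecessor, project out the starts) by one streaming pass that closes each run when the state changes and emits its start directly, never materialising runs; the merge-into-previous mutation is dead work for the returned value.
import Mathlib
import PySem

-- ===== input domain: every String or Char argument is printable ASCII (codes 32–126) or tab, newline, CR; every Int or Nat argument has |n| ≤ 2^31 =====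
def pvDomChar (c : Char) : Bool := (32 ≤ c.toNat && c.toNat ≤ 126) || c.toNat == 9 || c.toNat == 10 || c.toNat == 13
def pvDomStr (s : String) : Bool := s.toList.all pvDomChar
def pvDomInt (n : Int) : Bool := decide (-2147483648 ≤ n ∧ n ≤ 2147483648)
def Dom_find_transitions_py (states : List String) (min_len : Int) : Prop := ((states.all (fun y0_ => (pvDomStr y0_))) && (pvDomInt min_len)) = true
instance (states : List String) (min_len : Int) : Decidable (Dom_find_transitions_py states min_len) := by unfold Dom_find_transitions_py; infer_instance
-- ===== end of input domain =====

-- B replaces A's build-runs / merge-short-runs / project-starts pipeline by one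
-- streaming pass that emits each qualifying run's start directly (simpler, same cost).


-- ===== PORT A =====
-- inner while loop: 'while j < n and states[j] == states[i]: j += 1'
def advanceJ (states : List String) (i j : Nat) : Nat :=
  if _h : j < states.length then
    if states.getD j "" = states.getD i "" then advanceJ states i (j + 1) else j
  else j
termination_by states.length - j

-- used by buildRuns's decreasing_by (port termination): advanceJ never moves left
theorem advanceJ_ge (states : List String) (i j : Nat) : j ≤ advanceJ states i j := by
  fun_induction advanceJ states i j with
  | case1 j h heq ih => omega
  | case2 j h heq => omega
  | case3 j h => omega

-- outer while loop building runs (state, start, end_inclusive)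
def buildRuns (states : List String) (i : Nat) : List (String × Int × Int) :=
  if h : i < states.length then
    let j := advanceJ states i i
    (states.getD i "", ((i : Int), (j : Int) - 1)) :: buildRuns states j
  else []
termination_by states.length - i
decreasing_by
  have h1 : i + 1 ≤ advanceJ states i (i + 1) := advanceJ_ge states i (i + 1)
  have : advanceJ states i i = advanceJ states i (i + 1) := by
    rw [advanceJ]; simp [h]
  omega

-- 'for run in runs: …' merge-short-runs body
def filterStep (min_len : Int) (filtered : List (String × Int × Int))
    (run : String × Int × Int) : List (String × Int × Int) :=
  if filtered.length > 0 ∧ run.2.2 - run.2.1 + 1 < min_len then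
    filtered.dropLast ++ [(filtered.getLast!.1, filtered.getLast!.2.1, run.2.2)]
  else
    filtered ++ [run]

def find_transitions_py (states : List String) (min_len : Int) : List Int :=
  let runs := buildRuns states 0
  let filtered := runs.foldl (filterStep min_len) []
  (filtered.drop 1).map (fun r => r.2.1)

-- ===== PORT B =====
-- 'for i in range(1, n+1): …' of Source B as recursion on i
def altLoop (states : List String) (min_len : Int) (run_start : Nat) (first : Bool)
    (acc : List Int) (i : Nat) : List Int :=
  if i ≤ states.length then
    if i = states.length ∨ states.getD i "" ≠ states.getD run_start "" then
      let acc' := if first = false ∧ min_len ≤ (i : Int) - (run_start : Int)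
                  then acc ++ [(run_start : Int)] else acc
      altLoop states min_len i false acc' (i + 1)
    else
      altLoop states min_len run_start first acc (i + 1)
  else acc
termination_by states.length + 1 - i

def find_transitions_py_alt (states : List String) (min_len : Int) : List Int :=
  altLoop states min_len 0 true [] 1

-- ===== PRECONDITION & SPEC =====
def Spec_find_transitions_py (states : List String) (min_len : Int) (out : List Int) : Prop := out = find_transitions_py_alt states min_len
instance (states : List String) (min_len : Int) (out : List Int) : Decidable (Spec_find_transitions_py states min_len out) := by unfold Spec_find_transitions_py; infer_instance

-- ===== CLAIM (what is proved, stated in full; the proofs are below) =====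
def Claim_equal_find_transitions_py : Prop := ∀ (states : List String) (min_len : Int), Dom_find_transitions_py states min_len → Spec_find_transitions_py states min_len (find_transitions_py states min_len)

-- ===== LEMMAS AND PROOFS =====

-- common specification: emitted starts of runs, first run never emitted
def emitRuns (min_len : Int) (rs : List (String × Int × Int)) (first : Bool) : List Int :=
  match rs with
  | [] => []
  | r :: rs =>
      (if first = false ∧ min_len ≤ r.2.2 - r.2.1 + 1 then [r.2.1] else [])
        ++ emitRuns min_len rs false

theorem advanceJ_le (states : List String) (i j : Nat) (hj : j ≤ states.length) :
    advanceJ states i j ≤ states.length := by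
  fun_induction advanceJ states i j with
  | case1 j h heq ih => exact ih (by omega)
  | case2 j h heq => omega
  | case3 j h => omega

theorem advanceJ_stop (states : List String) (i j : Nat) (hj : j ≤ states.length) :
    advanceJ states i j = states.length ∨
      states.getD (advanceJ states i j) "" ≠ states.getD i "" := by
  fun_induction advanceJ states i j with
  | case1 j h heq ih => exact ih (by omega)
  | case2 j h heq => exact Or.inr heq
  | case3 j h => omega

theorem advanceJ_mid (states : List String) (i j : Nat) :
    ∀ k, j ≤ k → k < advanceJ states i j → states.getD k "" = states.getD i "" := by
  fun_induction advanceJ states i j with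
  | case1 j h heq ih =>
      intro k hk1 hk2
      rcases Nat.eq_or_lt_of_le hk1 with rfl | hk1
      · exact heq
      · exact ih k hk1 hk2
  | case2 j h heq => intro k hk1 hk2; omega
  | case3 j h => intro k hk1 hk2; omega

theorem advanceJ_gt (states : List String) (i : Nat) (h : i < states.length) :
    i < advanceJ states i i := by
  have h1 : i + 1 ≤ advanceJ states i (i + 1) := advanceJ_ge states i (i + 1)
  have : advanceJ states i i = advanceJ states i (i + 1) := by
    rw [advanceJ]; simp [h]
  omega

-- skipping the interior of a run
theorem altLoop_skip (states : List String) (min_len : Int) (i0 : Nat)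
    (h0 : i0 < states.length) (first : Bool) (acc : List Int) :
    ∀ i, i0 < i → i ≤ advanceJ states i0 i0 →
      altLoop states min_len i0 first acc i =
        altLoop states min_len i0 first acc (advanceJ states i0 i0) := by
  intro i hi hij
  have hJle : advanceJ states i0 i0 ≤ states.length := advanceJ_le states i0 i0 (by omega)
  obtain ⟨d, hd⟩ : ∃ d, advanceJ states i0 i0 - i = d := ⟨_, rfl⟩
  induction d generalizing i with
  | zero => have : i = advanceJ states i0 i0 := by omega
            rw [this]
  | succ d ih =>
      have hiJ : i < advanceJ states i0 i0 := by omega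
      have heq : states.getD i "" = states.getD i0 "" :=
        advanceJ_mid states i0 i0 i (by omega) hiJ
      rw [altLoop]
      have hle : i ≤ states.length := by omega
      have hne : ¬ (i = states.length ∨ states.getD i "" ≠ states.getD i0 "") := by
        simp only [not_or, not_not]; exact ⟨by omega, heq⟩
      simp only [hle, if_pos, hne, if_false]
      exact ih (i + 1) (by omega) (by omega) (by omega)

-- B's loop from the start of a run computes emitRuns of the remaining runs
theorem altLoop_run (states : List String) (min_len : Int) :
    ∀ i0, i0 < states.length → ∀ (first : Bool) (acc : List Int),
      altLoop states min_len i0 first acc (i0 + 1) =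
        acc ++ emitRuns min_len (buildRuns states i0) first := by
  intro i0 h0 first acc
  obtain ⟨d, hd⟩ : ∃ d, states.length - i0 = d := ⟨_, rfl⟩
  induction d using Nat.strong_induction_on generalizing i0 first acc with
  | _ d ih =>
  set J := advanceJ states i0 i0 with hJ
  have hgt : i0 < J := advanceJ_gt states i0 h0
  have hJle : J ≤ states.length := advanceJ_le states i0 i0 (by omega)
  have hstop := advanceJ_stop states i0 i0 (by omega)
  rw [altLoop_skip states min_len i0 h0 first acc (i0 + 1) (by omega) (by omega)]
  rw [altLoop]
  have hle : J ≤ states.length := hJle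
  have hcond : (J = states.length ∨ states.getD J "" ≠ states.getD i0 "") := by
    simpa [hJ] using hstop
  simp only [hle, if_pos, hcond, ← hJ]
  rw [buildRuns]
  simp only [h0, dif_pos, ← hJ, emitRuns]
  have hlen : ((J : Int) - 1 - (i0 : Int) + 1) = (J : Int) - (i0 : Int) := by ring
  by_cases hJn : J = states.length
  · -- last run: the loop exits at i = J + 1
    have hbr : buildRuns states J = [] := by rw [buildRuns]; simp [hJn]
    rw [altLoop]
    have : ¬ (J + 1 ≤ states.length) := by omega
    simp only [this, if_false, hbr, emitRuns, List.append_nil, hlen]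
    by_cases hc : first = false ∧ min_len ≤ (J : Int) - (i0 : Int)
    · simp [hc]
    · simp [hc]
  · -- more runs follow: recurse at J
    have hJlt : J < states.length := by omega
    rw [ih (states.length - J) (by omega) J hJlt false _ rfl]
    simp only [hlen]
    by_cases hc : first = false ∧ min_len ≤ (J : Int) - (i0 : Int)
    · simp [hc]
    · simp [hc]

-- A's fold over a nonempty accumulator only appends qualifying starts
theorem foldl_filterStep (min_len : Int) :
    ∀ (rs : List (String × Int × Int)) (acc : List (String × Int × Int)), acc ≠ [] →
      (rs.foldl (filterStep min_len) acc).map (fun r => r.2.1) =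
        acc.map (fun r => r.2.1) ++ emitRuns min_len rs false := by
  intro rs
  induction rs with
  | nil => intro acc hacc; simp [emitRuns]
  | cons r rs ih =>
      intro acc hacc
      simp only [List.foldl_cons, emitRuns]
      by_cases hshort : acc.length > 0 ∧ r.2.2 - r.2.1 + 1 < min_len
      · have hstep : filterStep min_len acc r =
            acc.dropLast ++ [(acc.getLast!.1, acc.getLast!.2.1, r.2.2)] := by
          simp [filterStep, hshort]
        have hne : filterStep min_len acc r ≠ [] := by simp [hstep]
        rw [ih _ hne, hstep]
        have hmap : (acc.dropLast ++ [(acc.getLast!.1, acc.getLast!.2.1, r.2.2)]).map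
            (fun r => r.2.1) = acc.map (fun r => r.2.1) := by
          conv_rhs => rw [← List.dropLast_append_getLast hacc]
          simp [List.getLast!_eq_getLast?_getD, List.getLast?_eq_some_getLast hacc]
        rw [hmap]
        have : ¬ (min_len ≤ r.2.2 - r.2.1 + 1) := by omega
        simp [this]
      · have hstep : filterStep min_len acc r = acc ++ [r] := by
          simp only [filterStep, hshort, if_false]
        have hne : filterStep min_len acc r ≠ [] := by simp [hstep]
        rw [ih _ hne, hstep]
        have hlen : acc.length > 0 := by
          cases acc with | nil => exact absurd rfl hacc | cons a l => simp
        have : min_len ≤ r.2.2 - r.2.1 + 1 := by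
          by_contra hlt; exact hshort ⟨hlen, by omega⟩
        simp [this]

-- ===== VERDICT (by name: the statement is the Claim_ definition above) =====
theorem find_transitions_py_spec : Claim_equal_find_transitions_py := by
  intro states min_len _
  unfold Spec_find_transitions_py find_transitions_py find_transitions_py_alt
  by_cases h0 : 0 < states.length
  · -- nonempty input: both sides equal emitRuns of the runs after the first
    have hA : buildRuns states 0 =
        (states.getD 0 "", ((0 : Int), (advanceJ states 0 0 : Int) - 1)) ::
          buildRuns states (advanceJ states 0 0) := by
      rw [buildRuns]; simp [h0]
    have hB := altLoop_run states min_len 0 h0 true []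
    simp only [Nat.zero_add] at hB
    rw [hB, hA]
    simp only [emitRuns, List.foldl_cons]
    have hfirst : filterStep min_len []
        (states.getD 0 "", ((0 : Int), (advanceJ states 0 0 : Int) - 1)) =
        [(states.getD 0 "", ((0 : Int), (advanceJ states 0 0 : Int) - 1))] := by
      simp [filterStep]
    rw [hfirst, List.map_drop, foldl_filterStep min_len _ _ (by simp)]
    simp
  · have hnil : states = [] := by
      cases states with | nil => rfl | cons a l => simp at h0
    subst hnil
    have : buildRuns [] 0 = [] := by rw [buildRuns]; simp
    rw [this]
    rw [altLoop]
    simp
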